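-- pv_equiv track=rewrite | github.com/yangezheng/datasheet-downloader | src/datasheet_downloader/downloader.py | _identify_manufacturer
-- ===== SOURCE A (Python) =====
-- from typing import Optional, List, Dict, Union, Tuple
--
-- def _identify_manufacturer(part_number: str) -> Optional[str]:
--     """
--     Identify manufacturer from part number prefix.
--
--     Args:
--         part_number: Component part number
--
--     Returns:
--         Manufacturer key or None
--     """
--     part_prefix = part_number.lower()[:3]
--
--     # Common manufacturer prefixes
--     prefix_map = {
--         "lm": "ti",
--         "tps": "ti",
--         "ads": "ti",
--         "msp": "ti",
--         "cc": "ti",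
--         "tlv": "ti",
--         "mc": "nxp",
--         "ad": "analog",
--         "lt": "analog",
--         "max": "analog",
--         "ncp": "onsemi",
--         "ncv": "onsemi",
--         "stm": "st",
--         "l6": "st",
--         "l7": "st",
--         "bsp": "infineon",
--         "irfp": "infineon",
--         "irf": "infineon",
--         "tls": "infineon",
--         "tle": "infineon",
--         "mic": "microchip",
--         "pic": "microchip",
--         "atmega": "microchip",
--         "bd": "rohm",
--     }
--
--     # Check for matches
--     for prefix, manufacturer in prefix_map.items():
--         if part_prefix.startswith(prefix):
--             return manufacturer
--
--     return None
-- ===== SOURCE B (Python) =====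
-- # Longest-prefix exact lookup: keys grouped by length (dead >3-char keys dropped), try length 3 then 2.
-- _PREFIX_BY_LEN = {
--     3: {
--         "tps": "ti", "ads": "ti", "msp": "ti", "tlv": "ti",
--         "max": "analog", "ncp": "onsemi", "ncv": "onsemi", "stm": "st",
--         "bsp": "infineon", "irf": "infineon", "tls": "infineon",
--         "tle": "infineon", "mic": "microchip", "pic": "microchip",
--     },
--     2: {
--         "lm": "ti", "cc": "ti", "mc": "nxp", "ad": "analog",
--         "lt": "analog", "l6": "st", "l7": "st", "bd": "rohm",
--     },
-- }
--
-- def _identify_manufacturer(part_number: str):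
--     part_prefix = part_number.lower()[:3]
--     for n in (3, 2):
--         manufacturer = _PREFIX_BY_LEN[n].get(part_prefix[:n])
--         if manufacturer is not None:
--             return manufacturer
--     return None
-- ===== Notes on version B (the rewrite author's own statement) =====
-- stated objective: alternative
-- what changed: Replaces the linear startswith scan over the 24-entry prefix dict by longest-prefix-first exact-key lookups in two maps grouped by prefix length (3 then 2), dropping the dead keys longer than 3 characters that can never match the truncated prefix.
import Mathlib
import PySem

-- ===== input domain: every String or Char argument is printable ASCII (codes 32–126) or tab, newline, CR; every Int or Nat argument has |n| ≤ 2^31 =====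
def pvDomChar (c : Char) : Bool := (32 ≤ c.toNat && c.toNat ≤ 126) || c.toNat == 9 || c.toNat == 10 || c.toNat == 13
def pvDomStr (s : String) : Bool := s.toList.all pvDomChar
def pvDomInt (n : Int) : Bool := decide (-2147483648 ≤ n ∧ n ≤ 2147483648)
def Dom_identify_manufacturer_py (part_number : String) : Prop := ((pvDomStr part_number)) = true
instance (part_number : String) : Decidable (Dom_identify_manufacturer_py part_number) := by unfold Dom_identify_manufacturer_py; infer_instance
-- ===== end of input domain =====

-- B replaces A's linear startswith scan over the prefix dict by two exact-key lookups
-- (length-3 map first, then length-2; dead keys longer than 3 dropped): an alternative decomposition.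

-- ===== PORT A =====
-- A's prefix_map, in Python insertion order (dict iteration order).
def pvPrefixMap : List (List Char × String) :=
  [ (['l','m'], "ti"), (['t','p','s'], "ti"), (['a','d','s'], "ti"), (['m','s','p'], "ti"),
    (['c','c'], "ti"), (['t','l','v'], "ti"), (['m','c'], "nxp"), (['a','d'], "analog"),
    (['l','t'], "analog"), (['m','a','x'], "analog"), (['n','c','p'], "onsemi"),
    (['n','c','v'], "onsemi"), (['s','t','m'], "st"), (['l','6'], "st"), (['l','7'], "st"),
    (['b','s','p'], "infineon"), (['i','r','f','p'], "infineon"), (['i','r','f'], "infineon"),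
    (['t','l','s'], "infineon"), (['t','l','e'], "infineon"), (['m','i','c'], "microchip"),
    (['p','i','c'], "microchip"), (['a','t','m','e','g','a'], "microchip"), (['b','d'], "rohm") ]

-- the 'for prefix, manufacturer in prefix_map.items(): if part_prefix.startswith(prefix): return manufacturer' loop
def pvScanA (part_prefix : List Char) : List (List Char × String) → Option String
  | [] => none
  | (pre, man) :: rest =>
      if PySem.Chars.startswith part_prefix pre then some man else pvScanA part_prefix rest

def identify_manufacturer_py (part_number : String) : Option String :=
  let part_prefix := PySem.Chars.slice (PySem.Chars.lower part_number.toList) none (some 3)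
  pvScanA part_prefix pvPrefixMap

-- ===== PORT B =====
-- _PREFIX_BY_LEN[3] and _PREFIX_BY_LEN[2] from Source B
def pvMap3 : PySem.Dict (List Char) String :=
  PySem.Dict.ofList
    [ (['t','p','s'], "ti"), (['a','d','s'], "ti"), (['m','s','p'], "ti"), (['t','l','v'], "ti"),
      (['m','a','x'], "analog"), (['n','c','p'], "onsemi"), (['n','c','v'], "onsemi"),
      (['s','t','m'], "st"), (['b','s','p'], "infineon"), (['i','r','f'], "infineon"),
      (['t','l','s'], "infineon"), (['t','l','e'], "infineon"), (['m','i','c'], "microchip"),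
      (['p','i','c'], "microchip") ]

def pvMap2 : PySem.Dict (List Char) String :=
  PySem.Dict.ofList
    [ (['l','m'], "ti"), (['c','c'], "ti"), (['m','c'], "nxp"), (['a','d'], "analog"),
      (['l','t'], "analog"), (['l','6'], "st"), (['l','7'], "st"), (['b','d'], "rohm") ]

-- Source B's 'for n in (3, 2)' loop, unrolled: try the length-3 exact key, then the length-2 one
def identify_manufacturer_py_alt (part_number : String) : Option String :=
  let part_prefix := PySem.Chars.slice (PySem.Chars.lower part_number.toList) none (some 3)
  match pvMap3.get? (PySem.Chars.slice part_prefix none (some 3)) with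
  | some m => some m
  | none =>
    match pvMap2.get? (PySem.Chars.slice part_prefix none (some 2)) with
    | some m => some m
    | none => none

-- ===== PRECONDITION & SPEC =====
def Spec_identify_manufacturer_py (part_number : String) (out : Option String) : Prop := out = identify_manufacturer_py_alt part_number
instance (part_number : String) (out : Option String) : Decidable (Spec_identify_manufacturer_py part_number out) := by unfold Spec_identify_manufacturer_py; infer_instance

-- ===== CLAIM (what is proved, stated in full; the proofs are below) =====
def Claim_equal_identify_manufacturer_py : Prop := ∀ (part_number : String), Dom_identify_manufacturer_py part_number → Spec_identify_manufacturer_py part_number (identify_manufacturer_py part_number)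

-- ===== LEMMAS AND PROOFS =====

-- core agreement on the (at most 3 characters long) lowered prefix
set_option maxHeartbeats 4000000 in
lemma pv_core (p : List Char) (h : p.length ≤ 3) :
    pvScanA p pvPrefixMap =
      (match pvMap3.get? (PySem.Chars.slice p none (some 3)) with
       | some m => some m
       | none =>
         match pvMap2.get? (PySem.Chars.slice p none (some 2)) with
         | some m => some m
         | none => none) := by
  have h3 : pvMap3 = PySem.Dict.mk
      [ (['t','p','s'], "ti"), (['a','d','s'], "ti"), (['m','s','p'], "ti"), (['t','l','v'], "ti"),
        (['m','a','x'], "analog"), (['n','c','p'], "onsemi"), (['n','c','v'], "onsemi"),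
        (['s','t','m'], "st"), (['b','s','p'], "infineon"), (['i','r','f'], "infineon"),
        (['t','l','s'], "infineon"), (['t','l','e'], "infineon"), (['m','i','c'], "microchip"),
        (['p','i','c'], "microchip") ] := by decide
  have h2 : pvMap2 = PySem.Dict.mk
      [ (['l','m'], "ti"), (['c','c'], "ti"), (['m','c'], "nxp"), (['a','d'], "analog"),
        (['l','t'], "analog"), (['l','6'], "st"), (['l','7'], "st"), (['b','d'], "rohm") ] := by decide
  have hnil : ∀ k : List Char, (PySem.Dict.mk ([] : List (List Char × String))).get? k = none :=
    fun _ => rfl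
  match p with
  | [] =>
      simp [pvScanA, pvPrefixMap, PySem.Chars.startswith, List.isPrefixOf,
        h3, h2, PySem.Dict.get?_mk_cons, hnil, PySem.List.slice_to]
  | [a] =>
      simp [pvScanA, pvPrefixMap, PySem.Chars.startswith, List.isPrefixOf,
        h3, h2, PySem.Dict.get?_mk_cons, hnil, PySem.List.slice_to]
  | [a, b] =>
      have hs3 : PySem.Chars.slice [a,b] none (some 3) = [a,b] := by simp [PySem.List.slice_to]
      have hs2 : PySem.Chars.slice [a,b] none (some 2) = [a,b] := by simp [PySem.List.slice_to]
      rw [h3, h2, hs3, hs2]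
      simp only [pvScanA, pvPrefixMap, PySem.Chars.startswith, List.isPrefixOf,
        PySem.Dict.get?_mk_cons, hnil, Bool.and_eq_true, beq_iff_eq, List.cons.injEq, and_true,
        Bool.false_eq_true, and_false, if_false, reduceCtorEq]
      by_cases hlm : ('l' = a ∧ 'm' = b)
      · obtain ⟨rfl, rfl⟩ := hlm
        simp_all
      by_cases hcc : ('c' = a ∧ 'c' = b)
      · obtain ⟨rfl, rfl⟩ := hcc
        simp_all
      by_cases hmc : ('m' = a ∧ 'c' = b)
      · obtain ⟨rfl, rfl⟩ := hmc
        simp_all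
      by_cases had : ('a' = a ∧ 'd' = b)
      · obtain ⟨rfl, rfl⟩ := had
        simp_all
      by_cases hlt : ('l' = a ∧ 't' = b)
      · obtain ⟨rfl, rfl⟩ := hlt
        simp_all
      by_cases hl6 : ('l' = a ∧ '6' = b)
      · obtain ⟨rfl, rfl⟩ := hl6
        simp_all
      by_cases hl7 : ('l' = a ∧ '7' = b)
      · obtain ⟨rfl, rfl⟩ := hl7
        simp_all
      by_cases hbd : ('b' = a ∧ 'd' = b)
      · obtain ⟨rfl, rfl⟩ := hbd
        simp_all
      have nlm : ¬('l' = a ∧ 'm' = b) := by tauto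
      have ncc : ¬('c' = a ∧ 'c' = b) := by tauto
      have nmc : ¬('m' = a ∧ 'c' = b) := by tauto
      have nad : ¬('a' = a ∧ 'd' = b) := by tauto
      have nlt : ¬('l' = a ∧ 't' = b) := by tauto
      have nl6 : ¬('l' = a ∧ '6' = b) := by tauto
      have nl7 : ¬('l' = a ∧ '7' = b) := by tauto
      have nbd : ¬('b' = a ∧ 'd' = b) := by tauto
      simp only [if_neg nlm, if_neg ncc, if_neg nmc, if_neg nad, if_neg nlt, if_neg nl6, if_neg nl7, if_neg nbd]
  | [a, b, c] =>
      have hs3 : PySem.Chars.slice [a,b,c] none (some 3) = [a,b,c] := by simp [PySem.List.slice_to]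
      have hs2 : PySem.Chars.slice [a,b,c] none (some 2) = [a,b] := by simp [PySem.List.slice_to]
      rw [h3, h2, hs3, hs2]
      simp only [pvScanA, pvPrefixMap, PySem.Chars.startswith, List.isPrefixOf,
        PySem.Dict.get?_mk_cons, hnil, Bool.and_eq_true, beq_iff_eq, List.cons.injEq, and_true,
        Bool.false_eq_true, and_false, if_false]
      by_cases hlm : ('l' = a ∧ 'm' = b)
      · obtain ⟨rfl, rfl⟩ := hlm
        simp_all
      by_cases htps : ('t' = a ∧ 'p' = b ∧ 's' = c)
      · obtain ⟨rfl, rfl, rfl⟩ := htps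
        simp_all
      by_cases hads : ('a' = a ∧ 'd' = b ∧ 's' = c)
      · obtain ⟨rfl, rfl, rfl⟩ := hads
        simp_all
      by_cases hmsp : ('m' = a ∧ 's' = b ∧ 'p' = c)
      · obtain ⟨rfl, rfl, rfl⟩ := hmsp
        simp_all
      by_cases hcc : ('c' = a ∧ 'c' = b)
      · obtain ⟨rfl, rfl⟩ := hcc
        simp_all
      by_cases htlv : ('t' = a ∧ 'l' = b ∧ 'v' = c)
      · obtain ⟨rfl, rfl, rfl⟩ := htlv
        simp_all
      by_cases hmc : ('m' = a ∧ 'c' = b)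
      · obtain ⟨rfl, rfl⟩ := hmc
        simp_all
      by_cases had : ('a' = a ∧ 'd' = b)
      · obtain ⟨rfl, rfl⟩ := had
        simp_all
      by_cases hlt : ('l' = a ∧ 't' = b)
      · obtain ⟨rfl, rfl⟩ := hlt
        simp_all
      by_cases hmax : ('m' = a ∧ 'a' = b ∧ 'x' = c)
      · obtain ⟨rfl, rfl, rfl⟩ := hmax
        simp_all
      by_cases hncp : ('n' = a ∧ 'c' = b ∧ 'p' = c)
      · obtain ⟨rfl, rfl, rfl⟩ := hncp
        simp_all
      by_cases hncv : ('n' = a ∧ 'c' = b ∧ 'v' = c)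
      · obtain ⟨rfl, rfl, rfl⟩ := hncv
        simp_all
      by_cases hstm : ('s' = a ∧ 't' = b ∧ 'm' = c)
      · obtain ⟨rfl, rfl, rfl⟩ := hstm
        simp_all
      by_cases hl6 : ('l' = a ∧ '6' = b)
      · obtain ⟨rfl, rfl⟩ := hl6
        simp_all
      by_cases hl7 : ('l' = a ∧ '7' = b)
      · obtain ⟨rfl, rfl⟩ := hl7
        simp_all
      by_cases hbsp : ('b' = a ∧ 's' = b ∧ 'p' = c)
      · obtain ⟨rfl, rfl, rfl⟩ := hbsp
        simp_all
      by_cases hirf : ('i' = a ∧ 'r' = b ∧ 'f' = c)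
      · obtain ⟨rfl, rfl, rfl⟩ := hirf
        simp_all
      by_cases htls : ('t' = a ∧ 'l' = b ∧ 's' = c)
      · obtain ⟨rfl, rfl, rfl⟩ := htls
        simp_all
      by_cases htle : ('t' = a ∧ 'l' = b ∧ 'e' = c)
      · obtain ⟨rfl, rfl, rfl⟩ := htle
        simp_all
      by_cases hmic : ('m' = a ∧ 'i' = b ∧ 'c' = c)
      · obtain ⟨rfl, rfl, rfl⟩ := hmic
        simp_all
      by_cases hpic : ('p' = a ∧ 'i' = b ∧ 'c' = c)
      · obtain ⟨rfl, rfl, rfl⟩ := hpic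
        simp_all
      by_cases hbd : ('b' = a ∧ 'd' = b)
      · obtain ⟨rfl, rfl⟩ := hbd
        simp_all
      have nlm : ¬('l' = a ∧ 'm' = b) := by tauto
      have ntps : ¬('t' = a ∧ 'p' = b ∧ 's' = c) := by tauto
      have nads : ¬('a' = a ∧ 'd' = b ∧ 's' = c) := by tauto
      have nmsp : ¬('m' = a ∧ 's' = b ∧ 'p' = c) := by tauto
      have ncc : ¬('c' = a ∧ 'c' = b) := by tauto
      have ntlv : ¬('t' = a ∧ 'l' = b ∧ 'v' = c) := by tauto
      have nmc : ¬('m' = a ∧ 'c' = b) := by tauto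
      have nad : ¬('a' = a ∧ 'd' = b) := by tauto
      have nlt : ¬('l' = a ∧ 't' = b) := by tauto
      have nmax : ¬('m' = a ∧ 'a' = b ∧ 'x' = c) := by tauto
      have nncp : ¬('n' = a ∧ 'c' = b ∧ 'p' = c) := by tauto
      have nncv : ¬('n' = a ∧ 'c' = b ∧ 'v' = c) := by tauto
      have nstm : ¬('s' = a ∧ 't' = b ∧ 'm' = c) := by tauto
      have nl6 : ¬('l' = a ∧ '6' = b) := by tauto
      have nl7 : ¬('l' = a ∧ '7' = b) := by tauto
      have nbsp : ¬('b' = a ∧ 's' = b ∧ 'p' = c) := by tauto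
      have nirf : ¬('i' = a ∧ 'r' = b ∧ 'f' = c) := by tauto
      have ntls : ¬('t' = a ∧ 'l' = b ∧ 's' = c) := by tauto
      have ntle : ¬('t' = a ∧ 'l' = b ∧ 'e' = c) := by tauto
      have nmic : ¬('m' = a ∧ 'i' = b ∧ 'c' = c) := by tauto
      have npic : ¬('p' = a ∧ 'i' = b ∧ 'c' = c) := by tauto
      have nbd : ¬('b' = a ∧ 'd' = b) := by tauto
      simp only [if_neg nlm, if_neg ntps, if_neg nads, if_neg nmsp, if_neg ncc, if_neg ntlv, if_neg nmc, if_neg nad, if_neg nlt, if_neg nmax, if_neg nncp, if_neg nncv, if_neg nstm, if_neg nl6, if_neg nl7, if_neg nbsp, if_neg nirf, if_neg ntls, if_neg ntle, if_neg nmic, if_neg npic, if_neg nbd]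
  | _ :: _ :: _ :: _ :: _ =>
      simp at h
      omega

-- ===== VERDICT (by name: the statement is the Claim_ definition above) =====
set_option maxHeartbeats 1000000 in
theorem identify_manufacturer_py_spec : Claim_equal_identify_manufacturer_py := by
  intro pn _
  unfold Spec_identify_manufacturer_py identify_manufacturer_py identify_manufacturer_py_alt
  exact pv_core _ (by simp [PySem.List.slice_to])
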